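-- pv_equiv track=rewrite | github.com/penguinmenac3/advent-of-ai-2024 | src/08/08.py | find_antinodes
-- ===== SOURCE A (Python) =====
-- from typing import List, Tuple, Dict, Set
--
-- def find_antinodes(grid: List[List[str]]) -> Tuple[Set[Tuple[int, int]], Set[Tuple[int, int]]]:
--     """
--     Finds antinode positions and antinode positions with harmonics
--     from the given grid of characters.
--
--     Parameters:
--     - grid (List[List[str]]): A 2D list representing the grid of characters.
--
--     Returns:
--     - Tuple[Set[Tuple[int, int]], Set[Tuple[int, int]]]: A tuple containing two sets of positions.
--       The first set contains antinode positions, and the second set contains antinode positions with harmonics.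
--     """
--     antinode_positions: Set[Tuple[int, int]] = set()
--     antinode_positions_with_harmonics: Set[Tuple[int, int]] = set()
--     freq_to_positions: Dict[str, List[Tuple[int, int]]] = {}
--
--     # Populate the frequency dictionary with antenna positions
--     rows, cols = len(grid), len(grid[0])
--     for i in range(rows):
--         for j in range(cols):
--             char = grid[i][j]
--             if char != '.':
--                 if char not in freq_to_positions:
--                     freq_to_positions[char] = []
--                 freq_to_positions[char].append((i, j))
--
--     # Calculate antinodes for each frequency
--     for freq, positions in freq_to_positions.items():
--         for i in range(len(positions)):
--             x1, y1 = positions[i]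
--             for j in range(i + 1, len(positions)):
--                 x2, y2 = positions[j]
--
--                 # Calculate differences
--                 dx, dy = x2 - x1, y2 - y1
--
--                 # Check if one is twice as far away in any direction
--                 antinode_pos1 = (x1 - dx, y1 - dy)
--                 antinode_pos2 = (x2 + dx, y2 + dy)
--
--                 if 0 <= antinode_pos1[0] < rows and 0 <= antinode_pos1[1] < cols:
--                     antinode_positions.add(antinode_pos1)
--                 if 0 <= antinode_pos2[0] < rows and 0 <= antinode_pos2[1] < cols:
--                     antinode_positions.add(antinode_pos2)
--
--                 antinode_pos = (x1, y1)
--                 while 0 <= antinode_pos[0] < rows and 0 <= antinode_pos[1] < cols: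
--                     antinode_positions_with_harmonics.add(antinode_pos)
--                     antinode_pos = (antinode_pos[0] - dx, antinode_pos[1] - dy)
--
--                 antinode_pos = (x2, y2)
--                 while 0 <= antinode_pos[0] < rows and 0 <= antinode_pos[1] < cols:
--                     antinode_positions_with_harmonics.add(antinode_pos)
--                     antinode_pos = (antinode_pos[0] + dx, antinode_pos[1] + dy)
--
--     return antinode_positions, antinode_positions_with_harmonics
-- ===== SOURCE B (Python) =====
-- from typing import List, Tuple, Dict, Set
--
--
-- def pairs_of(positions):
--     """All ordered pairs (p, q) with p occurring before q in the list."""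
--     if not positions:
--         return []
--     p, rest = positions[0], positions[1:]
--     return [(p, q) for q in rest] + pairs_of(rest)
--
--
-- def find_antinodes(grid: List[List[str]]) -> Tuple[Set[Tuple[int, int]], Set[Tuple[int, int]]]:
--     rows, cols = len(grid), len(grid[0])
--     freq_to_positions: Dict[str, List[Tuple[int, int]]] = {}
--     for i in range(rows):
--         for j in range(cols):
--             char = grid[i][j]
--             if char != '.':
--                 freq_to_positions.setdefault(char, []).append((i, j))
--
--     # Stage 1: one flat list of all same-frequency antenna pairs.
--     pairs = []
--     for positions in freq_to_positions.values():
--         pairs += pairs_of(positions)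
--
--     def reach(x, y, sx, sy):
--         # closed-form count of extra in-bounds steps from (x, y) along (sx, sy)
--         limits = []
--         if sx > 0:
--             limits.append((rows - 1 - x) // sx)
--         elif sx < 0:
--             limits.append(x // (-sx))
--         if sy > 0:
--             limits.append((cols - 1 - y) // sy)
--         elif sy < 0:
--             limits.append(y // (-sy))
--         return min(limits)
--
--     # Stage 2: simple antinodes (the two mirror points of each pair, if in bounds).
--     antinode_positions: Set[Tuple[int, int]] = set()
--     for (x1, y1), (x2, y2) in pairs:
--         dx, dy = x2 - x1, y2 - y1
--         for (x, y) in ((x1 - dx, y1 - dy), (x2 + dx, y2 + dy)):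
--             if 0 <= x < rows and 0 <= y < cols:
--                 antinode_positions.add((x, y))
--
--     # Stage 3: harmonics via the closed-form ray length (no bounds-checked walk).
--     antinode_positions_with_harmonics: Set[Tuple[int, int]] = set()
--     for (x1, y1), (x2, y2) in pairs:
--         dx, dy = x2 - x1, y2 - y1
--         for k in range(reach(x1, y1, -dx, -dy) + 1):
--             antinode_positions_with_harmonics.add((x1 - k * dx, y1 - k * dy))
--         for k in range(reach(x2, y2, dx, dy) + 1):
--             antinode_positions_with_harmonics.add((x2 + k * dx, y2 + k * dy))
--
--     return antinode_positions, antinode_positions_with_harmonics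
-- ===== Notes on version B (the rewrite author's own statement) =====
-- stated objective: alternative
-- what changed: A's single triple-nested pass with bounds-checked while-walks is replaced by staged passes over one flat precomputed pair list (built by head/rest recursion instead of index loops), and the harmonic while-walks are replaced by a closed-form ray length computed with floor division (reach = min of per-coordinate step limits) followed by a plain counted range, with the simple antinodes computed in a separate pass as the two filtered mirror points.
import Mathlib
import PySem

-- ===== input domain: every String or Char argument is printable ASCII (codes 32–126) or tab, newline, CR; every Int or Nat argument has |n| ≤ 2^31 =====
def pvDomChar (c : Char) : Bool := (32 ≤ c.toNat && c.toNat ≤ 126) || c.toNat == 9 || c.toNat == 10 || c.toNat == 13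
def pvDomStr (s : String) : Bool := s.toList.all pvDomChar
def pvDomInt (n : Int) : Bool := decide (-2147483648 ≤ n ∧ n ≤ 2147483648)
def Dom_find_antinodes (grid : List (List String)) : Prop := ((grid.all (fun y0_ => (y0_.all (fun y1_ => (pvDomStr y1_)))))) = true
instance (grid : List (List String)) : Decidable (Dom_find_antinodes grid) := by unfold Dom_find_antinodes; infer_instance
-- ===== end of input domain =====

-- B replaces A's single triple-nested pass (guarded adds + bounds-checked while-walks)
-- by staged passes over one flat precomputed pair list, with the harmonic walks replaced
-- by a closed-form floor-division ray length and a counted range (alternative decomposition).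

-- ===== PORT A =====
def pvInB (rows cols x y : Int) : Bool := decide (0 ≤ x ∧ x < rows ∧ 0 ≤ y ∧ y < cols)

-- the while loops of A (fuel (rows+cols).toNat+1 only makes the recursion total;
-- the step is never (0,0) for a pair of distinct antennas, so Python's loop exits within that bound)
def pvWalkA (rows cols sx sy : Int) : Nat → Int → Int → PySem.Set (Int × Int) → PySem.Set (Int × Int)
  | 0, _, _, s => s
  | fuel+1, x, y, s =>
    if pvInB rows cols x y then
      pvWalkA rows cols sx sy fuel (x + sx) (y + sy) (PySem.Set.add s (x, y))
    else s

def pvBuildA (grid : List (List String)) (rows cols : Int) : PySem.Dict String (List (Int × Int)) :=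
  (PySem.List.pyRange 0 rows 1).foldl (fun d i =>
    (PySem.List.pyRange 0 cols 1).foldl (fun d j =>
      let ch := PySem.List.pyGetD (PySem.List.pyGetD grid i []) j ""
      if ch ≠ "." then
        let d' := if d.contains ch then d else d.insert ch []
        d'.insert ch (d'.getD ch [] ++ [(i, j)])
      else d) d) PySem.Dict.empty

def pvPairA (rows cols x1 y1 x2 y2 : Int)
    (st : PySem.Set (Int × Int) × PySem.Set (Int × Int)) :
    PySem.Set (Int × Int) × PySem.Set (Int × Int) :=
  let dx := x2 - x1
  let dy := y2 - y1
  let s1 := if pvInB rows cols (x1 - dx) (y1 - dy) then PySem.Set.add st.1 (x1 - dx, y1 - dy) else st.1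
  let s1 := if pvInB rows cols (x2 + dx) (y2 + dy) then PySem.Set.add s1 (x2 + dx, y2 + dy) else s1
  let s2 := pvWalkA rows cols (-dx) (-dy) ((rows + cols).toNat + 1) x1 y1 st.2
  let s2 := pvWalkA rows cols dx dy ((rows + cols).toNat + 1) x2 y2 s2
  (s1, s2)

def pvLoopA (rows cols : Int) (ps : List (Int × Int))
    (st : PySem.Set (Int × Int) × PySem.Set (Int × Int)) :
    PySem.Set (Int × Int) × PySem.Set (Int × Int) :=
  (PySem.List.pyRange 0 (PySem.List.len ps) 1).foldl (fun st i =>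
    let p1 := PySem.List.pyGetD ps i (0, 0)
    (PySem.List.pyRange (i + 1) (PySem.List.len ps) 1).foldl (fun st j =>
      let p2 := PySem.List.pyGetD ps j (0, 0)
      pvPairA rows cols p1.1 p1.2 p2.1 p2.2 st) st) st

def find_antinodes (grid : List (List String)) : (List (Int × Int)) × (List (Int × Int)) :=
  let rows : Int := PySem.List.len grid
  let cols : Int := PySem.List.len (PySem.List.pyGetD grid 0 [])
  let d := pvBuildA grid rows cols
  d.items.foldl (fun st kv => pvLoopA rows cols kv.2 st) (PySem.Set.empty, PySem.Set.empty)

-- ===== PORT B =====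
def pvInB2 (rows cols x y : Int) : Bool := decide (0 ≤ x ∧ x < rows ∧ 0 ≤ y ∧ y < cols)

-- pairs_of: all ordered pairs (p, q) with p before q, by head/rest recursion
def pvPairsOf : List (Int × Int) → List ((Int × Int) × (Int × Int))
  | [] => []
  | p :: rest => rest.map (fun q => (p, q)) ++ pvPairsOf rest

def pvBuildB (grid : List (List String)) (rows cols : Int) : PySem.Dict String (List (Int × Int)) :=
  (PySem.List.pyRange 0 rows 1).foldl (fun d i =>
    (PySem.List.pyRange 0 cols 1).foldl (fun d j =>
      let ch := PySem.List.pyGetD (PySem.List.pyGetD grid i []) j ""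
      if ch ≠ "." then
        let d' := d.setdefault ch []
        d'.insert ch (d'.getD ch [] ++ [(i, j)])
      else d) d) PySem.Dict.empty

-- reach: closed-form count of extra in-bounds steps from (x,y) along (sx,sy).
-- Python's min(limits) raises on an empty list ((sx,sy)=(0,0)); that never occurs for a
-- pair of distinct antennas — the .getD 0 default only makes the port total.
def pvReach (rows cols x y sx sy : Int) : Int :=
  let limits : List Int :=
    (if sx > 0 then [PySem.Int.floordiv (rows - 1 - x) sx]
     else if sx < 0 then [PySem.Int.floordiv x (-sx)] else []) ++
    (if sy > 0 then [PySem.Int.floordiv (cols - 1 - y) sy]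
     else if sy < 0 then [PySem.Int.floordiv y (-sy)] else [])
  (PySem.List.min? limits (fun v => v)).getD 0

def pvSimpleB (rows cols : Int) (pairs : List ((Int × Int) × (Int × Int))) :
    PySem.Set (Int × Int) :=
  pairs.foldl (fun s pr =>
    let dx := pr.2.1 - pr.1.1
    let dy := pr.2.2 - pr.1.2
    [(pr.1.1 - dx, pr.1.2 - dy), (pr.2.1 + dx, pr.2.2 + dy)].foldl
      (fun s p => if pvInB2 rows cols p.1 p.2 then PySem.Set.add s p else s) s)
    PySem.Set.empty

def pvHarmB (rows cols : Int) (pairs : List ((Int × Int) × (Int × Int))) :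
    PySem.Set (Int × Int) :=
  pairs.foldl (fun s pr =>
    let dx := pr.2.1 - pr.1.1
    let dy := pr.2.2 - pr.1.2
    let s := (PySem.List.pyRange 0 (pvReach rows cols pr.1.1 pr.1.2 (-dx) (-dy) + 1) 1).foldl
      (fun s k => PySem.Set.add s (pr.1.1 - k * dx, pr.1.2 - k * dy)) s
    (PySem.List.pyRange 0 (pvReach rows cols pr.2.1 pr.2.2 dx dy + 1) 1).foldl
      (fun s k => PySem.Set.add s (pr.2.1 + k * dx, pr.2.2 + k * dy)) s)
    PySem.Set.empty

def find_antinodes_alt (grid : List (List String)) : (List (Int × Int)) × (List (Int × Int)) :=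
  let rows : Int := PySem.List.len grid
  let cols : Int := PySem.List.len (PySem.List.pyGetD grid 0 [])
  let d := pvBuildB grid rows cols
  let pairs := d.values.foldl (fun acc ps => acc ++ pvPairsOf ps) []
  (pvSimpleB rows cols pairs, pvHarmB rows cols pairs)

-- ===== PRECONDITION & SPEC =====
-- Pre_ excludes exactly the inputs on which the Python A raises IndexError:
-- an empty grid (grid[0]), and grids whose first row is longer than some later row (grid[i][j]).
def Pre_find_antinodes (grid : List (List String)) : Prop :=
  grid ≠ [] ∧ ∀ row ∈ grid, grid.headI.length ≤ row.length
instance (grid : List (List String)) : Decidable (Pre_find_antinodes grid) := by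
  unfold Pre_find_antinodes; infer_instance
def pvWitness_find_antinodes : List (List String) := [["a", "a"], ["a", "."]]
def Spec_find_antinodes (grid : List (List String)) (out : (List (Int × Int)) × (List (Int × Int))) : Prop := out = find_antinodes_alt grid
instance (grid : List (List String)) (out : (List (Int × Int)) × (List (Int × Int))) : Decidable (Spec_find_antinodes grid out) := by unfold Spec_find_antinodes; infer_instance

-- ===== CLAIM (what is proved, stated in full; the proofs are below) =====
def Claim_equal_find_antinodes : Prop := ∀ (grid : List (List String)), Dom_find_antinodes grid → Pre_find_antinodes grid → Spec_find_antinodes grid (find_antinodes grid)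

-- ===== LEMMAS AND PROOFS =====

-- dict-building equality (setdefault vs contains-guarded insert)
theorem pvDict_ext {κ ν : Type} (a b : PySem.Dict κ ν) (h : a.items = b.items) : a = b := by
  cases a; cases b; cases h; rfl

theorem pvSetdefault_eq (d : PySem.Dict String (List (Int × Int))) (k : String)
    (v : List (Int × Int)) :
    d.setdefault k v = if d.contains k then d else d.insert k v := by
  by_cases h : d.contains k
  · simp [PySem.Dict.setdefault, h]
  · apply pvDict_ext
    rw [if_neg h, PySem.Dict.items_insert_of_not_contains _ _ (by simpa using h)]
    simp [PySem.Dict.setdefault, h]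

theorem pvBuild_eq (grid : List (List String)) (rows cols : Int) :
    pvBuildB grid rows cols = pvBuildA grid rows cols := by
  unfold pvBuildB pvBuildA
  refine PySem.List.foldl_congr_mem _ _ _ _ (fun acc i _ => ?_)
  refine PySem.List.foldl_congr_mem _ _ _ _ (fun acc2 j _ => ?_)
  dsimp only
  rw [pvSetdefault_eq]

-- every stored antenna position is an in-bounds grid cell
theorem pvBuild_inv (grid : List (List String)) (rows cols : Int) :
    ∀ kv ∈ (pvBuildA grid rows cols).items, ∀ p ∈ kv.2,
      pvInB rows cols p.1 p.2 = true := by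
  unfold pvBuildA
  refine List.foldlRecOn (motive := fun (d : PySem.Dict String (List (Int × Int))) => ∀ kv ∈ d.items, ∀ p ∈ kv.2,
    pvInB rows cols p.1 p.2 = true) _ _ ?_ ?_
  · intro kv hkv
    simp [PySem.Dict.empty] at hkv
  · intro d hd i hi
    refine List.foldlRecOn (motive := fun (d : PySem.Dict String (List (Int × Int))) => ∀ kv ∈ d.items, ∀ p ∈ kv.2,
      pvInB rows cols p.1 p.2 = true) _ _ hd ?_
    intro d2 hd2 j hj
    have hib : 0 ≤ i ∧ i < rows := by
      simpa [PySem.List.mem_pyRange_one] using hi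
    have hjb : 0 ≤ j ∧ j < cols := by
      simpa [PySem.List.mem_pyRange_one] using hj
    dsimp only
    split
    · set ch := PySem.List.pyGetD (PySem.List.pyGetD grid i []) j "" with hch
      set d' := if d2.contains ch then d2 else d2.insert ch [] with hd'
      have hP' : ∀ kv ∈ d'.items, ∀ p ∈ kv.2, pvInB rows cols p.1 p.2 = true := by
        rw [hd']
        split
        · exact hd2
        · intro kv hkv
          rcases (PySem.Dict.mem_items_insert _ _ _ kv).1 hkv with h1 | ⟨h2, _⟩
          · subst h1; intro p hp; simp at hp
          · exact hd2 kv h2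
      intro kv hkv
      rcases (PySem.Dict.mem_items_insert _ _ _ kv).1 hkv with h1 | ⟨h2, _⟩
      · subst h1
        intro p hp
        rcases List.mem_append.1 hp with hp1 | hp2
        · rcases hg : d'.get? ch with _ | w
          · rw [PySem.Dict.getD_eq_get?_getD, hg] at hp1; simp at hp1
          · rw [PySem.Dict.getD_eq_get?_getD, hg] at hp1
            exact hP' (ch, w) (PySem.Dict.mem_items_of_get?_eq_some d' hg) p hp1
        · have : p = (i, j) := by simpa using hp2
          subst this
          simp only [pvInB]
          exact decide_eq_true (by exact ⟨hib.1, hib.2, hjb.1, hjb.2⟩)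
      · exact hP' kv h2
    · exact hd2

-- pairs_of membership
theorem pvMem_pairsOf : ∀ (l : List (Int × Int)) (pr : (Int × Int) × (Int × Int)),
    pr ∈ pvPairsOf l → pr.1 ∈ l ∧ pr.2 ∈ l := by
  intro l
  induction l with
  | nil => intro pr h; simp [pvPairsOf] at h
  | cons p rest ih =>
    intro pr h
    simp only [pvPairsOf, List.mem_append, List.mem_map] at h
    rcases h with ⟨q, hq, rfl⟩ | h
    · exact ⟨List.mem_cons_self, List.mem_cons_of_mem _ hq⟩
    · exact ⟨List.mem_cons_of_mem _ (ih pr h).1, List.mem_cons_of_mem _ (ih pr h).2⟩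

-- index shift for pyGetD on a cons
theorem pvGetD_shift (p : Int × Int) (rest : List (Int × Int)) (k : Nat) (d : Int × Int) :
    PySem.List.pyGetD (p :: rest) (1 + (k : Int)) d = PySem.List.pyGetD rest (k : Int) d := by
  have h : (1 + (k : Int)) = ((k + 1 : Nat) : Int) := by push_cast; ring
  rw [h, PySem.List.pyGetD_natCast, PySem.List.pyGetD_natCast]
  simp [List.getD]

-- A's double index loop over a list is the fold over its pair list
theorem pvPairsLoop {σ : Type} (g : (Int × Int) → (Int × Int) → σ → σ) :
    ∀ (ps : List (Int × Int)) (st : σ),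
    (PySem.List.pyRange 0 (PySem.List.len ps) 1).foldl (fun st i =>
      (PySem.List.pyRange (i + 1) (PySem.List.len ps) 1).foldl (fun st j =>
        g (PySem.List.pyGetD ps i (0, 0)) (PySem.List.pyGetD ps j (0, 0)) st) st) st
    = (pvPairsOf ps).foldl (fun st pr => g pr.1 pr.2 st) st := by
  intro ps
  induction ps with
  | nil =>
    intro st
    simp [PySem.List.len_eq, PySem.List.pyRange_one_eq_nil, pvPairsOf]
  | cons p rest ih =>
    intro st
    have hlen : PySem.List.len (p :: rest) = (rest.length : Int) + 1 := by
      simp [PySem.List.len_eq]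
    rw [hlen, PySem.List.pyRange_one_cons (by positivity), List.foldl_cons]
    -- first iteration (i = 0) produces the (p, q) pairs
    have h0 : ∀ s : σ, (PySem.List.pyRange (0 + 1) ((rest.length : Int) + 1) 1).foldl (fun st j =>
        g (PySem.List.pyGetD (p :: rest) 0 (0, 0)) (PySem.List.pyGetD (p :: rest) j (0, 0)) st) s
        = (rest.map (fun q => (p, q))).foldl (fun st pr => g pr.1 pr.2 st) s := by
      intro s
      have hp0 : PySem.List.pyGetD (p :: rest) 0 (0, 0) = p := by
        rw [show (0 : Int) = ((0 : Nat) : Int) from rfl, PySem.List.pyGetD_natCast]; rfl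
      rw [hp0]
      have h := PySem.List.foldl_pyRange_pyGetD' (p :: rest) ((0, 0) : Int × Int)
        (f := fun st p2 => g p p2 st) (init := s) (a := 1) (by norm_num)
      exact h.trans (List.foldl_map (f := fun q => (p, q))
        (g := fun st pr => g pr.1 pr.2 st) (l := rest) (init := s)).symm
    rw [h0 st]
    rw [show pvPairsOf (p :: rest) = rest.map (fun q => (p, q)) ++ pvPairsOf rest from rfl,
      List.foldl_append]
    rw [← ih ((rest.map (fun q => (p, q))).foldl (fun st pr => g pr.1 pr.2 st) st)]
    -- the remaining iterations walk over rest, with all indices shifted by one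
    simp only [zero_add]
    have h1 : ((rest.length : Int) + 1 - 1).toNat = rest.length := by omega
    have h2 : ((rest.length : Int) - 0).toNat = rest.length := by omega
    rw [PySem.List.pyRange_one 1 ((rest.length : Int) + 1), h1,
      PySem.List.len_eq, PySem.List.pyRange_one 0 ((rest.length : Int)), h2]
    simp only [zero_add]
    rw [List.foldl_map (f := fun k : Nat => 1 + (k : Int)),
      List.foldl_map (f := fun k : Nat => ((k : Nat) : Int))]
    refine PySem.List.foldl_congr_mem _ _ _ _ (fun acc k hk => ?_)
    dsimp only
    rw [pvGetD_shift]
    have hdrop : (p :: rest).drop ((1 : Int) + (k : Int) + 1).toNat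
        = rest.drop (((k : Int)) + 1).toNat := by
      have h1 : ((1 : Int) + (k : Int) + 1).toNat = k + 2 := by omega
      have h2 : (((k : Int)) + 1).toNat = k + 1 := by omega
      rw [h1, h2]; rfl
    have hL := PySem.List.foldl_pyRange_pyGetD' (p :: rest) ((0, 0) : Int × Int)
      (f := fun st p2 => g (PySem.List.pyGetD rest (k : Int) (0, 0)) p2 st)
      (init := acc) (a := 1 + (k : Int) + 1) (by positivity)
    have hR := PySem.List.foldl_pyRange_pyGetD' rest ((0, 0) : Int × Int)
      (f := fun st p2 => g (PySem.List.pyGetD rest (k : Int) (0, 0)) p2 st)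
      (init := acc) (a := (k : Int) + 1) (by positivity)
    exact hL.trans (Eq.trans (by rw [hdrop]) hR.symm)

-- a fold of folds is a fold over the flattened list
theorem pvFoldlFlatMap {α β σ : Type} (g : α → List β) (f : σ → β → σ) :
    ∀ (l : List α) (init : σ),
    l.foldl (fun s x => (g x).foldl f s) init = (l.flatMap g).foldl f init := by
  intro l
  induction l with
  | nil => intro init; rfl
  | cons x xs ih => intro init; simp [List.flatMap_cons, List.foldl_append, ih]

-- Set.add is idempotent
theorem pvAdd_idem (s : PySem.Set (Int × Int)) (p : Int × Int) :
    PySem.Set.add (PySem.Set.add s p) p = PySem.Set.add s p := by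
  by_cases h : p ∈ s <;> simp [PySem.Set.add, h]

-- a walk from an out-of-bounds point adds nothing
theorem pvWalk_notin (rows cols sx sy : Int) (fuel : Nat) (x y : Int)
    (s : PySem.Set (Int × Int)) (h : pvInB rows cols x y = false) :
    pvWalkA rows cols sx sy fuel x y s = s := by
  cases fuel <;> simp [pvWalkA, h]

-- a walk with zero step from an in-bounds point adds exactly its start
theorem pvWalk_zero (rows cols : Int) (fuel : Nat) (x y : Int)
    (s : PySem.Set (Int × Int)) (h : pvInB rows cols x y = true) :
    pvWalkA rows cols 0 0 (fuel + 1) x y s = PySem.Set.add s (x, y) := by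
  induction fuel generalizing s with
  | zero => simp [pvWalkA, h]
  | succ f ih =>
    have : pvWalkA rows cols 0 0 (f + 1 + 1) x y s
        = pvWalkA rows cols 0 0 (f + 1) x y (PySem.Set.add s (x, y)) := by
      simp [pvWalkA, h]
    rw [this, ih, pvAdd_idem]

-- the walk visits exactly the counted ray when it leaves bounds right after step n
theorem pvWalk_ray (rows cols sx sy : Int) :
    ∀ (n : Nat) (x y : Int) (s : PySem.Set (Int × Int)) (fuel : Nat),
    (∀ k : Nat, k ≤ n → pvInB rows cols (x + k * sx) (y + k * sy) = true) →
    pvInB rows cols (x + ((n : Int) + 1) * sx) (y + ((n : Int) + 1) * sy) = false →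
    n < fuel →
    pvWalkA rows cols sx sy fuel x y s
      = (List.range (n + 1)).foldl (fun s (k : Nat) => PySem.Set.add s (x + k * sx, y + k * sy)) s := by
  intro n
  induction n with
  | zero =>
    intro x y s fuel hin hout hf
    obtain ⟨t, rfl⟩ : ∃ t, fuel = t + 1 := ⟨fuel - 1, by omega⟩
    have h0 : pvInB rows cols x y = true := by
      have := hin 0 le_rfl; simpa using this
    have h1 : pvInB rows cols (x + sx) (y + sy) = false := by
      have := hout; simpa using this
    simp only [pvWalkA, h0, if_pos]
    rw [pvWalk_notin _ _ _ _ _ _ _ _ h1]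
    simp
  | succ n ih =>
    intro x y s fuel hin hout hf
    obtain ⟨t, rfl⟩ : ∃ t, fuel = t + 1 := ⟨fuel - 1, by omega⟩
    have h0 : pvInB rows cols x y = true := by
      have := hin 0 (by omega); simpa using this
    simp only [pvWalkA, h0, if_pos]
    rw [ih (x + sx) (y + sy) (PySem.Set.add s (x, y)) t
      (fun k hk => by
        have := hin (k + 1) (by omega)
        have he : x + ((k + 1 : Nat) : Int) * sx = x + sx + (k : Int) * sx := by push_cast; ring
        have he2 : y + ((k + 1 : Nat) : Int) * sy = y + sy + (k : Int) * sy := by push_cast; ring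
        rw [he, he2] at this
        exact this)
      (by
        have := hout
        push_cast at this ⊢
        rw [show x + ((n : Int) + 1 + 1) * sx = x + sx + ((n : Int) + 1) * sx from by ring,
          show y + ((n : Int) + 1 + 1) * sy = y + sy + ((n : Int) + 1) * sy from by ring] at this
        exact this)
      (by omega)]
    rw [show List.range (n + 1 + 1) = 0 :: (List.range (n + 1)).map Nat.succ from List.range_succ_eq_map]
    rw [List.foldl_cons, List.foldl_map]
    have hs : PySem.Set.add s ((x + (0 : Nat) * sx, y + (0 : Nat) * sy)) = PySem.Set.add s (x, y) := by
      norm_num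
    rw [hs]
    refine PySem.List.foldl_congr_mem _ _ _ _ (fun acc k hk => ?_)
    have e1 : x + (↑(Nat.succ k) : Int) * sx = x + sx + (k : Int) * sx := by push_cast; ring
    have e2 : y + (↑(Nat.succ k) : Int) * sy = y + sy + (k : Int) * sy := by push_cast; ring
    rw [e1, e2]

-- ===== reach: closed-form ray length vs the bounds-checked walk =====

def pvCLim (bound x s : Int) : List Int :=
  if s > 0 then [PySem.Int.floordiv (bound - 1 - x) s]
  else if s < 0 then [PySem.Int.floordiv x (-s)] else []

theorem pvReach_eq (rows cols x y sx sy : Int) :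
    pvReach rows cols x y sx sy
      = (PySem.List.min? (pvCLim rows x sx ++ pvCLim cols y sy) (fun v => v)).getD 0 := rfl

theorem pvCLim_nonneg {bound x : Int} (s : Int) (h0 : 0 ≤ x) (h1 : x < bound) :
    ∀ q ∈ pvCLim bound x s, 0 ≤ q := by
  intro q hq
  unfold pvCLim at hq
  split_ifs at hq with hs1 hs2
  · simp only [List.mem_singleton] at hq; subst hq
    exact (PySem.Int.le_floordiv_iff_mul_le hs1).2 (by nlinarith)
  · simp only [List.mem_singleton] at hq; subst hq
    exact (PySem.Int.le_floordiv_iff_mul_le (by omega : (0:Int) < -s)).2 (by nlinarith)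
  · simp at hq

theorem pvCLim_in {bound x : Int} (s : Int) (h0 : 0 ≤ x) (h1 : x < bound) {k : Int}
    (hk : 0 ≤ k) (hall : ∀ q ∈ pvCLim bound x s, k ≤ q) :
    0 ≤ x + k * s ∧ x + k * s < bound := by
  rcases lt_trichotomy s 0 with hs | hs | hs
  · have hq := hall (PySem.Int.floordiv x (-s)) (by
      unfold pvCLim; rw [if_neg (by omega), if_pos hs]; exact List.mem_singleton.2 rfl)
    have hle : k * -s ≤ x := (PySem.Int.le_floordiv_iff_mul_le (by omega : (0:Int) < -s)).1 hq
    have h' : -(k * s) ≤ x := by simpa [mul_neg] using hle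
    have hks : k * s ≤ 0 := mul_nonpos_of_nonneg_of_nonpos hk hs.le
    constructor <;> linarith
  · subst hs; simp only [mul_zero, add_zero]; exact ⟨h0, h1⟩
  · have hq := hall (PySem.Int.floordiv (bound - 1 - x) s) (by
      unfold pvCLim; rw [if_pos hs]; exact List.mem_singleton.2 rfl)
    have hle : k * s ≤ bound - 1 - x := (PySem.Int.le_floordiv_iff_mul_le hs).1 hq
    have hks : 0 ≤ k * s := mul_nonneg hk hs.le
    constructor <;> linarith

theorem pvCLim_out {bound x s q k : Int} (hq : q ∈ pvCLim bound x s) (hlt : q < k) :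
    ¬(0 ≤ x + k * s ∧ x + k * s < bound) := by
  unfold pvCLim at hq
  split_ifs at hq with hs1 hs2
  · simp only [List.mem_singleton] at hq; subst hq
    have := (PySem.Int.floordiv_lt_iff_lt_mul hs1).1 hlt
    rintro ⟨-, h2⟩; linarith
  · simp only [List.mem_singleton] at hq; subst hq
    have := (PySem.Int.floordiv_lt_iff_lt_mul (by omega : (0:Int) < -s)).1 hlt
    have h' : x < -(k * s) := by simpa [mul_neg] using this
    rintro ⟨h1, -⟩; linarith
  · simp at hq

theorem pvCLim_le {bound x : Int} (s : Int) (h0 : 0 ≤ x) (h1 : x < bound) :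
    ∀ q ∈ pvCLim bound x s, q ≤ bound := by
  intro q hq
  unfold pvCLim at hq
  split_ifs at hq with hs1 hs2
  · simp only [List.mem_singleton] at hq; subst hq
    have : PySem.Int.floordiv (bound - 1 - x) s < bound + 1 :=
      (PySem.Int.floordiv_lt_iff_lt_mul hs1).2 (by nlinarith)
    omega
  · simp only [List.mem_singleton] at hq; subst hq
    have : PySem.Int.floordiv x (-s) < bound + 1 :=
      (PySem.Int.floordiv_lt_iff_lt_mul (by omega : (0:Int) < -s)).2 (by nlinarith)
    omega
  · simp at hq

-- one direction: the bounds-checked walk equals the counted ray of length reach+1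
theorem pvDirEq (rows cols x y sx sy : Int) (s : PySem.Set (Int × Int))
    (h0 : pvInB rows cols x y = true) :
    pvWalkA rows cols sx sy ((rows + cols).toNat + 1) x y s
      = (PySem.List.pyRange 0 (pvReach rows cols x y sx sy + 1) 1).foldl
          (fun s k => PySem.Set.add s (x + k * sx, y + k * sy)) s := by
  have hb : 0 ≤ x ∧ x < rows ∧ 0 ≤ y ∧ y < cols := by
    simpa [pvInB] using h0
  by_cases hzero : sx = 0 ∧ sy = 0
  · obtain ⟨rfl, rfl⟩ := hzero
    have hr : pvReach rows cols x y 0 0 = 0 := by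
      rw [pvReach_eq]; simp [pvCLim, PySem.List.min?]
    rw [hr, pvWalk_zero rows cols _ x y s h0,
      show PySem.List.pyRange 0 (0 + 1) 1 = [0] from by
        rw [show (0:Int) + 1 = 0 + 1 from rfl]; exact PySem.List.pyRange_one_singleton 0]
    simp
  · have hclne : ∀ b z t : Int, t ≠ 0 → pvCLim b z t ≠ [] := by
      intro b z t ht
      unfold pvCLim
      split_ifs with h1 h2
      · simp
      · simp
      · omega
    have hne : pvCLim rows x sx ++ pvCLim cols y sy ≠ [] := by
      rcases not_and_or.1 hzero with h | h
      · intro hc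
        exact hclne rows x sx h (List.append_eq_nil_iff.1 hc).1
      · intro hc
        exact hclne cols y sy h (List.append_eq_nil_iff.1 hc).2
    obtain ⟨K, hK⟩ : ∃ K, PySem.List.min? (pvCLim rows x sx ++ pvCLim cols y sy) (fun v => v) = some K := by
      rcases h : PySem.List.min? (pvCLim rows x sx ++ pvCLim cols y sy) (fun v => v) with _ | K
      · exact absurd ((PySem.List.min?_eq_none_iff _ _).1 h) hne
      · exact ⟨K, rfl⟩
    have hKmem := PySem.List.min?_mem hK
    have hKmin := PySem.List.min?_isMin hK
    have hreach : pvReach rows cols x y sx sy = K := by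
      rw [pvReach_eq, hK]; rfl
    have hK0 : 0 ≤ K := by
      rcases List.mem_append.1 hKmem with h | h
      · exact pvCLim_nonneg sx hb.1 hb.2.1 K h
      · exact pvCLim_nonneg sy hb.2.2.1 hb.2.2.2 K h
    have hKle : K ≤ rows + cols := by
      rcases List.mem_append.1 hKmem with h | h
      · have := pvCLim_le sx hb.1 hb.2.1 K h
        omega
      · have := pvCLim_le sy hb.2.2.1 hb.2.2.2 K h
        omega
    have hn : ((K.toNat : Nat) : Int) = K := Int.toNat_of_nonneg hK0
    have hin : ∀ k : Nat, k ≤ K.toNat → pvInB rows cols (x + k * sx) (y + k * sy) = true := by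
      intro k hk
      have hkK : (k : Int) ≤ K := by omega
      have hx := pvCLim_in sx hb.1 hb.2.1 (k := (k : Int)) (by positivity)
        (fun q hq => le_trans hkK (hKmin q (List.mem_append_left _ hq)))
      have hy := pvCLim_in sy hb.2.2.1 hb.2.2.2 (k := (k : Int)) (by positivity)
        (fun q hq => le_trans hkK (hKmin q (List.mem_append_right _ hq)))
      rw [pvInB]
      exact decide_eq_true ⟨hx.1, hx.2, hy.1, hy.2⟩
    have hout : pvInB rows cols (x + (((K.toNat : Nat) : Int) + 1) * sx)
        (y + (((K.toNat : Nat) : Int) + 1) * sy) = false := by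
      rcases List.mem_append.1 hKmem with h | h
      · have hoc := pvCLim_out h (by omega : K < ((K.toNat : Nat) : Int) + 1)
        rw [pvInB]; apply decide_eq_false
        rintro ⟨a, b, -, -⟩; exact hoc ⟨a, b⟩
      · have hoc := pvCLim_out h (by omega : K < ((K.toNat : Nat) : Int) + 1)
        rw [pvInB]; apply decide_eq_false
        rintro ⟨-, -, c, d⟩; exact hoc ⟨c, d⟩
    have hfuel : K.toNat < (rows + cols).toNat + 1 := by omega
    rw [pvWalk_ray rows cols sx sy K.toNat x y s _ hin hout hfuel, hreach]
    have h1 : (K + 1 - 0).toNat = K.toNat + 1 := by omega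
    rw [PySem.List.pyRange_one 0 (K + 1), h1,
      List.foldl_map (f := fun k : Nat => (0 : Int) + (k : Int))]
    refine PySem.List.foldl_congr_mem _ _ _ _ (fun acc k _ => ?_)
    norm_num

-- ===== assembly: A's fused pass equals B's staged passes =====

-- the two independent components of A's per-pair update
def pvStepS (rows cols : Int) (s1 : PySem.Set (Int × Int))
    (pr : (Int × Int) × (Int × Int)) : PySem.Set (Int × Int) :=
  let dx := pr.2.1 - pr.1.1
  let dy := pr.2.2 - pr.1.2
  let s1 := if pvInB rows cols (pr.1.1 - dx) (pr.1.2 - dy) then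
    PySem.Set.add s1 (pr.1.1 - dx, pr.1.2 - dy) else s1
  if pvInB rows cols (pr.2.1 + dx) (pr.2.2 + dy) then
    PySem.Set.add s1 (pr.2.1 + dx, pr.2.2 + dy) else s1

def pvStepH (rows cols : Int) (s2 : PySem.Set (Int × Int))
    (pr : (Int × Int) × (Int × Int)) : PySem.Set (Int × Int) :=
  let dx := pr.2.1 - pr.1.1
  let dy := pr.2.2 - pr.1.2
  pvWalkA rows cols dx dy ((rows + cols).toNat + 1) pr.2.1 pr.2.2
    (pvWalkA rows cols (-dx) (-dy) ((rows + cols).toNat + 1) pr.1.1 pr.1.2 s2)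

theorem pvMain (rows cols : Int) (d : PySem.Dict String (List (Int × Int)))
    (hinv : ∀ kv ∈ d.items, ∀ p ∈ kv.2, pvInB rows cols p.1 p.2 = true) :
    d.items.foldl (fun st kv => pvLoopA rows cols kv.2 st) (PySem.Set.empty, PySem.Set.empty)
      = (pvSimpleB rows cols (d.values.foldl (fun acc ps => acc ++ pvPairsOf ps) []),
         pvHarmB rows cols (d.values.foldl (fun acc ps => acc ++ pvPairsOf ps) [])) := by
  have hpairs : d.values.foldl (fun acc ps => acc ++ pvPairsOf ps) []
      = d.items.flatMap (fun kv => pvPairsOf kv.2) := by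
    rw [PySem.List.foldl_append_eq_flatMap]
    simp [PySem.Dict.values, List.flatMap_map]
  rw [hpairs]
  have hA : d.items.foldl (fun st kv => pvLoopA rows cols kv.2 st)
        (PySem.Set.empty, PySem.Set.empty)
      = d.items.foldl (fun st kv => (pvPairsOf kv.2).foldl
          (fun st pr => pvPairA rows cols pr.1.1 pr.1.2 pr.2.1 pr.2.2 st) st)
        (PySem.Set.empty, PySem.Set.empty) := by
    refine PySem.List.foldl_congr_mem _ _ _ _ (fun acc kv _ => ?_)
    exact pvPairsLoop (fun p1 p2 st => pvPairA rows cols p1.1 p1.2 p2.1 p2.2 st) kv.2 acc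
  rw [hA, pvFoldlFlatMap (fun kv => pvPairsOf kv.2)
    (fun st pr => pvPairA rows cols pr.1.1 pr.1.2 pr.2.1 pr.2.2 st) d.items
    (PySem.Set.empty, PySem.Set.empty)]
  have hmem : ∀ pr ∈ d.items.flatMap (fun kv => pvPairsOf kv.2),
      pvInB rows cols pr.1.1 pr.1.2 = true ∧ pvInB rows cols pr.2.1 pr.2.2 = true := by
    intro pr hpr
    obtain ⟨kv, hkv, hpr⟩ := List.mem_flatMap.1 hpr
    have h2 := pvMem_pairsOf kv.2 pr hpr
    exact ⟨hinv kv hkv _ h2.1, hinv kv hkv _ h2.2⟩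
  have hsplit := PySem.List.foldl_prod_mk (pvStepS rows cols) (pvStepH rows cols)
    (d.items.flatMap (fun kv => pvPairsOf kv.2)) PySem.Set.empty PySem.Set.empty
  refine Eq.trans hsplit ?_
  refine Prod.ext ?_ ?_
  · rfl
  · show (d.items.flatMap (fun kv => pvPairsOf kv.2)).foldl (pvStepH rows cols) PySem.Set.empty
      = pvHarmB rows cols (d.items.flatMap (fun kv => pvPairsOf kv.2))
    unfold pvHarmB
    refine PySem.List.foldl_congr_mem _ _ _ _ (fun acc pr hpr => ?_)
    obtain ⟨hp1, hp2⟩ := hmem pr hpr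
    show pvStepH rows cols acc pr = _
    unfold pvStepH
    simp only []
    rw [pvDirEq rows cols pr.1.1 pr.1.2 _ _ _ hp1,
      pvDirEq rows cols pr.2.1 pr.2.2 _ _ _ hp2]
    congr 1
    simp only [mul_neg, ← sub_eq_add_neg]

-- ===== VERDICT (by name: the statement is the Claim_ definition above) =====
theorem find_antinodes_spec : Claim_equal_find_antinodes := by
  intro grid _ _
  simp only [Spec_find_antinodes, find_antinodes, find_antinodes_alt, pvBuild_eq]
  exact pvMain _ _ _ (pvBuild_inv grid _ _)
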